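-- pv_equiv track=rewrite | github.com/Bruno-Bells/Litika-Engine | chunk.py | EBE_get_table_chunk_type_v_1_0_0
-- ===== SOURCE A (Python) =====
-- def EBE_get_text_type_percs_v_1_0_0(text):
--     digit_count = 0
--     char_count = 0
--     other_count = 0
--     for t in text:
--         if t != ' ':
--             if t.isdigit():
--                 digit_count += 1
--             elif t.isalpha():
--                 char_count += 1
--             else:
--                 other_count += 1
--
--     try:
--         non_character_perc = int(((digit_count+other_count)/(digit_count + char_count + other_count))*100)
--         digit_perc = int((digit_count/(digit_count + char_count + other_count))*100)
--     except:
--         non_character_perc = 0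
--         digit_perc = 0
--     return non_character_perc, digit_perc
--
-- def EBE_get_table_chunk_type_v_1_0_0(chunk):
--     non_key_text = []
--     for i in range(len(chunk)):
--         text = chunk[i][0][0]
--         bbox = chunk[i][1]
--         for ii in range(len(bbox)):
--             if bbox[ii][0] > 200: # the aim of this is to only get stuff from the value columns
--                 non_key_text.append(text[ii])
--
--     len_list = []
--     for t in range(len(chunk)):
--         len_list.append(len(chunk[t][0][0]))
--     max_len = max(len_list)
--
--     non_key_text = ' '.join(non_key_text)
--     non_character_perc, digit_perc = EBE_get_text_type_percs_v_1_0_0(non_key_text)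
--
--     if digit_perc > 20:
--         table_type = 'Numbers'
--     else:
--         if max_len > 5:
--             table_type = 'Numbers'
--         else:
--             table_type = 'Text'
--
--     return table_type
-- ===== SOURCE B (Python) =====
-- def EBE_get_table_chunk_type_v_1_0_0(chunk):
--     max_len = max(len(row[0][0]) for row in chunk)
--     digits = 0
--     total = 0
--     for texts, bbox in chunk:
--         for cell, tok in zip(bbox, texts[0]):
--             if cell[0] > 200:
--                 for ch in tok:
--                     if ch != ' ':
--                         total += 1
--                         if ch.isdigit():
--                             digits += 1
--     if total and digits * 100 // total > 20:
--         return 'Numbers'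
--     return 'Numbers' if max_len > 5 else 'Text'
-- ===== Notes on version B (the rewrite author's own statement) =====
-- stated objective: simpler
-- what changed: B fuses A's three passes (collect-chars-into-list + join, separate length-list pass, three-counter helper) into one pass with two inline counters over zip(bbox, text), computing the percentage with exact integer division instead of float truncation (identical >20 decision).
-- outside the precondition, e.g. on EBE_get_table_chunk_type_v_1_0_0([]): A raises ValueError, B raises ValueError
import Mathlib
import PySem

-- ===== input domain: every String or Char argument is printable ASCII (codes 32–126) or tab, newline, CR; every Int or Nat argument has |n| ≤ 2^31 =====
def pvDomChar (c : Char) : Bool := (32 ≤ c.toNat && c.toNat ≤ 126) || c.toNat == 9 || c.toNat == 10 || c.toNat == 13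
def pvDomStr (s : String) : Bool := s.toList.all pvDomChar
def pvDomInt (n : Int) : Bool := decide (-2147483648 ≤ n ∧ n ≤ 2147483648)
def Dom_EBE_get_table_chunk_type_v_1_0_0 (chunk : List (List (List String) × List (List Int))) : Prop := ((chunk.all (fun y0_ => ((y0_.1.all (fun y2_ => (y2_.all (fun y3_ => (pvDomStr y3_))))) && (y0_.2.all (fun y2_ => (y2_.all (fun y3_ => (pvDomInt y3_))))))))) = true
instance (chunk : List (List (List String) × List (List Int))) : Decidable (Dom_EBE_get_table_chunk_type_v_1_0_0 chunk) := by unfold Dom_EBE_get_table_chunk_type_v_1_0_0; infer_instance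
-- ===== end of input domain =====

-- B: one fused counting pass with two inline counters over zip(bbox, tokens), instead of A's
-- collect-list + ' '.join + three-counter helper + separate length-list pass (objective: simpler).
-- ===== PORT A =====
-- helper EBE_get_text_type_percs_v_1_0_0; the float truncations int((x/tot)*100) are modelled by
-- exact floor division, which is exact for the only use made of the result (the digit_perc > 20 test).
def pvPercs (cs : List Char) : Int × Int :=
  let c := cs.foldl (fun (acc : Int × Int × Int) t =>
      if t ≠ ' ' then
        if PySem.Chars.isdigit t then (acc.1 + 1, acc.2.1, acc.2.2)
        else if PySem.Chars.isalpha t then (acc.1, acc.2.1 + 1, acc.2.2)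
        else (acc.1, acc.2.1, acc.2.2 + 1)
      else acc) (0, 0, 0)
  let tot := c.1 + c.2.1 + c.2.2
  -- try/except: ZeroDivisionError when tot = 0 gives (0, 0)
  if tot = 0 then (0, 0)
  else (PySem.Int.floordiv ((c.1 + c.2.2) * 100) tot, PySem.Int.floordiv (c.1 * 100) tot)

def EBE_get_table_chunk_type_v_1_0_0 (chunk : List (List (List String) × List (List Int))) : String :=
  let nonKey : List String := chunk.foldl (fun acc row =>
    let text := PySem.List.pyGetD row.1 0 []
    let bbox := row.2
    (PySem.List.pyRange 0 (bbox.length : Int)).foldl (fun acc2 ii =>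
      if 200 < PySem.List.pyGetD (PySem.List.pyGetD bbox ii []) 0 0 then
        acc2 ++ [PySem.List.pyGetD text ii ""]
      else acc2) acc) []
  let lenList : List Int := chunk.foldl (fun acc row =>
    acc ++ [((PySem.List.pyGetD row.1 0 []).length : Int)]) []
  let maxLen : Int := (PySem.List.max? lenList id).getD 0    -- max([]) raises: excluded by Pre_
  -- ' '.join(non_key_text), as its character list
  let joined : List Char := (List.intersperse " " nonKey).flatMap String.toList
  let percs := pvPercs joined
  if percs.2 > 20 then "Numbers"
  else if maxLen > 5 then "Numbers" else "Text"

-- ===== PORT B =====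
def EBE_get_table_chunk_type_v_1_0_0_alt (chunk : List (List (List String) × List (List Int))) : String :=
  let maxLen : Int := (PySem.List.max?
    (chunk.map (fun row => ((PySem.List.pyGetD row.1 0 []).length : Int))) id).getD 0
  let dt : Int × Int := chunk.foldl (fun acc row =>
    (List.zip row.2 (PySem.List.pyGetD row.1 0 [])).foldl (fun (acc2 : Int × Int) p =>
      if 200 < PySem.List.pyGetD p.1 0 0 then
        p.2.toList.foldl (fun (acc3 : Int × Int) ch =>
          if ch ≠ ' ' then
            (acc3.1 + (if PySem.Chars.isdigit ch then 1 else 0), acc3.2 + 1)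
          else acc3) acc2
      else acc2) acc) (0, 0)
  if dt.2 ≠ 0 ∧ 20 < PySem.Int.floordiv (dt.1 * 100) dt.2 then "Numbers"
  else if maxLen > 5 then "Numbers" else "Text"

-- ===== PRECONDITION & SPEC =====
-- Pre_ excludes exactly the inputs on which A raises: the empty chunk (max([]) ValueError), a row with
-- an empty list of texts (chunk[i][0][0] IndexError), an empty bbox cell (bbox[ii][0] IndexError), and
-- a cell with first coordinate > 200 at an index beyond the row's token list (text[ii] IndexError).
def Pre_EBE_get_table_chunk_type_v_1_0_0 (chunk : List (List (List String) × List (List Int))) : Prop :=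
  chunk ≠ [] ∧ ∀ row ∈ chunk, row.1 ≠ [] ∧ ∀ p ∈ row.2.zipIdx,
    p.1 ≠ [] ∧ (200 < p.1.headI → p.2 < row.1.headI.length)
instance (chunk : List (List (List String) × List (List Int))) : Decidable (Pre_EBE_get_table_chunk_type_v_1_0_0 chunk) := by unfold Pre_EBE_get_table_chunk_type_v_1_0_0; infer_instance

def pvWitness_EBE_get_table_chunk_type_v_1_0_0 : (List (List (List String) × List (List Int))) :=
  [([["ab", "c"]], [[250, 0], [100]])]

def Spec_EBE_get_table_chunk_type_v_1_0_0 (chunk : List (List (List String) × List (List Int))) (out : String) : Prop := out = EBE_get_table_chunk_type_v_1_0_0_alt chunk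
instance (chunk : List (List (List String) × List (List Int))) (out : String) : Decidable (Spec_EBE_get_table_chunk_type_v_1_0_0 chunk out) := by unfold Spec_EBE_get_table_chunk_type_v_1_0_0; infer_instance

-- ===== CLAIM (what is proved, stated in full; the proofs are below) =====
def Claim_equal_EBE_get_table_chunk_type_v_1_0_0 : Prop := ∀ (chunk : List (List (List String) × List (List Int))), Dom_EBE_get_table_chunk_type_v_1_0_0 chunk → Pre_EBE_get_table_chunk_type_v_1_0_0 chunk → Spec_EBE_get_table_chunk_type_v_1_0_0 chunk (EBE_get_table_chunk_type_v_1_0_0 chunk)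
-- ===== LEMMAS AND PROOFS =====

-- character classes used by the counting (pvPd: counted digit, pvPa: counted letter, pvPo: counted other,
-- pvPn: counted at all, i.e. not a space)
def pvPd (c : Char) : Bool := decide (c ≠ ' ') && PySem.Chars.isdigit c
def pvPa (c : Char) : Bool := decide (c ≠ ' ') && !PySem.Chars.isdigit c && PySem.Chars.isalpha c
def pvPo (c : Char) : Bool := decide (c ≠ ' ') && !PySem.Chars.isdigit c && !PySem.Chars.isalpha c
def pvPn (c : Char) : Bool := decide (c ≠ ' ')

-- the tokens one row contributes to non_key_text (with Python's out-of-range defaults)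
def pvSeg : List (List Int) → List String → List String
  | [], _ => []
  | cell :: bs, toks =>
    (if 200 < PySem.List.pyGetD cell 0 0 then [PySem.List.pyGetD toks 0 ""] else []) ++ pvSeg bs (toks.drop 1)

def pvCD (s : String) : Nat := s.toList.countP pvPd
def pvCN (s : String) : Nat := s.toList.countP pvPn
def pvSegRow (row : List (List String) × List (List Int)) : List String :=
  pvSeg row.2 (PySem.List.pyGetD row.1 0 [])

theorem pvTripleFold (cs : List Char) : ∀ a b c : Int,
    cs.foldl (fun (acc : Int × Int × Int) t =>
      if t ≠ ' ' then
        if PySem.Chars.isdigit t then (acc.1 + 1, acc.2.1, acc.2.2)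
        else if PySem.Chars.isalpha t then (acc.1, acc.2.1 + 1, acc.2.2)
        else (acc.1, acc.2.1, acc.2.2 + 1)
      else acc) (a, b, c)
    = (a + cs.countP pvPd, b + cs.countP pvPa, c + cs.countP pvPo) := by
  induction cs with
  | nil => simp
  | cons x xs ih =>
    intro a b c
    simp only [List.foldl_cons]
    split_ifs with h1 h2 h3 <;> rw [ih] <;>
      simp_all [List.countP_cons, pvPd, pvPa, pvPo, Prod.ext_iff] <;> omega

theorem pvSumThree (cs : List Char) :
    cs.countP pvPd + cs.countP pvPa + cs.countP pvPo = cs.countP pvPn := by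
  induction cs with
  | nil => simp
  | cons x xs ih =>
    simp only [List.countP_cons, pvPd, pvPa, pvPo, pvPn]
    by_cases hx : x = ' ' <;> by_cases hd : PySem.Chars.isdigit x <;>
      by_cases ha : PySem.Chars.isalpha x <;> simp [hx, hd, ha] <;> omega

theorem pvJoinCount (p : Char → Bool) (hp : p ' ' = false) (toks : List String) :
    ((List.intersperse " " toks).flatMap String.toList).countP p
      = (toks.map (fun s => s.toList.countP p)).sum := by
  induction toks with
  | nil => simp
  | cons a t ih =>
    cases t with
    | nil => simp
    | cons b t' =>
      have hsp : (" " : String).toList.countP p = 0 := by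
        have h : (" " : String).toList = [' '] := by decide
        simp [h, hp]
      simp only [List.intersperse, List.flatMap_cons, List.countP_append,
        List.map_cons, List.sum_cons] at *
      omega

theorem pvTokFold (cs : List Char) : ∀ d t : Int,
    cs.foldl (fun (acc3 : Int × Int) ch =>
        if ch ≠ ' ' then
          (acc3.1 + (if PySem.Chars.isdigit ch then 1 else 0), acc3.2 + 1)
        else acc3) (d, t)
    = (d + cs.countP pvPd, t + cs.countP pvPn) := by
  induction cs with
  | nil => simp
  | cons x xs ih =>
    intro d t
    simp only [List.foldl_cons]
    split_ifs with h1 h2 <;> rw [ih] <;>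
      simp_all [List.countP_cons, pvPd, pvPn, Prod.ext_iff] <;> omega

theorem pvSeg_nil_mem (bs : List (List Int)) : ∀ s ∈ pvSeg bs [], s = "" := by
  induction bs with
  | nil => simp [pvSeg]
  | cons cell bs ih =>
    intro s hs
    simp only [pvSeg, List.drop_nil] at hs
    rcases List.mem_append.mp hs with h | h
    · split at h <;> simp_all [PySem.List.pyGetD] <;> decide
    · exact ih s h

theorem pvZipFold (bbox : List (List Int)) : ∀ (toks : List String) (d t : Int),
    (List.zip bbox toks).foldl (fun (acc2 : Int × Int) p =>
      if 200 < PySem.List.pyGetD p.1 0 0 then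
        p.2.toList.foldl (fun (acc3 : Int × Int) ch =>
          if ch ≠ ' ' then
            (acc3.1 + (if PySem.Chars.isdigit ch then 1 else 0), acc3.2 + 1)
          else acc3) acc2
      else acc2) (d, t)
    = (d + (((pvSeg bbox toks).map pvCD).sum : Int), t + (((pvSeg bbox toks).map pvCN).sum : Int)) := by
  induction bbox with
  | nil => simp [pvSeg]
  | cons cell bs ih =>
    intro toks d t
    cases toks with
    | nil =>
      have hz : (List.zip (cell :: bs) ([] : List String)) = [] := List.zip_nil_right
      have hcd : ((pvSeg (cell :: bs) []).map pvCD).sum = 0 := by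
        apply List.sum_eq_zero
        intro x hx
        rcases List.mem_map.mp hx with ⟨s, hs, rfl⟩
        rw [pvSeg_nil_mem _ s hs]; rfl
      have hcn : ((pvSeg (cell :: bs) []).map pvCN).sum = 0 := by
        apply List.sum_eq_zero
        intro x hx
        rcases List.mem_map.mp hx with ⟨s, hs, rfl⟩
        rw [pvSeg_nil_mem _ s hs]; rfl
      simp [hz, hcd, hcn]
    | cons tok ts =>
      simp only [List.zip_cons_cons, List.foldl_cons]
      have h0 : PySem.List.pyGetD (tok :: ts) 0 "" = tok := by
        simp [PySem.List.pyGetD]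
      by_cases hc : 200 < PySem.List.pyGetD cell 0 0
      · simp only [hc, if_pos, pvSeg, h0, List.drop_succ_cons, List.drop_zero]
        rw [pvTokFold, ih]
        simp [pvCD, pvCN]
        constructor <;> push_cast <;> ring
      · simp only [hc, if_neg, if_false, pvSeg, List.drop_succ_cons, List.drop_zero]
        rw [ih]
        simp [hc]


def pvSegsOf (chunk : List (List (List String) × List (List Int))) : List String :=
  chunk.flatMap pvSegRow
def pvD (chunk : List (List (List String) × List (List Int))) : Nat :=
  ((pvSegsOf chunk).map pvCD).sum
def pvN (chunk : List (List (List String) × List (List Int))) : Nat :=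
  ((pvSegsOf chunk).map pvCN).sum
def pvMax (chunk : List (List (List String) × List (List Int))) : Int :=
  (PySem.List.max? (chunk.map (fun row => ((PySem.List.pyGetD row.1 0 []).length : Int))) id).getD 0

theorem pvMapFilterNat (bbox : List (List Int)) : ∀ toks : List String,
    ((List.range bbox.length).filter
        (fun k => decide (200 < PySem.List.pyGetD (PySem.List.pyGetD bbox ((k : Nat) : Int) []) 0 0))).map
      (fun k => PySem.List.pyGetD toks ((k : Nat) : Int) "")
    = pvSeg bbox toks := by
  induction bbox with
  | nil => intro toks; simp [pvSeg]
  | cons cell bs ih =>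
    intro toks
    have h0b : PySem.List.pyGetD (cell :: bs) ((0 : Nat) : Int) [] = cell := by
      rw [PySem.List.pyGetD_natCast]; rfl
    have hsb : ∀ k : Nat,
        PySem.List.pyGetD (cell :: bs) ((k + 1 : Nat) : Int) [] = PySem.List.pyGetD bs ((k : Nat) : Int) [] := by
      intro k; rw [PySem.List.pyGetD_natCast, PySem.List.pyGetD_natCast]; rfl
    have hst : ∀ k : Nat,
        PySem.List.pyGetD toks ((k + 1 : Nat) : Int) "" = PySem.List.pyGetD (toks.drop 1) ((k : Nat) : Int) "" := by
      intro k; rw [PySem.List.pyGetD_natCast, PySem.List.pyGetD_natCast]; cases toks <;> rfl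
    rw [List.length_cons, List.range_succ_eq_map]
    simp only [List.filter_cons, List.filter_map, List.map_cons, List.map_map,
      Function.comp_def, Nat.succ_eq_add_one, hsb, hst, h0b]
    try simp only [List.map_map, Function.comp_def, Nat.succ_eq_add_one, hst]
    by_cases hc : 200 < PySem.List.pyGetD cell 0 0
    · simp only [hc, decide_true, if_pos, List.map_cons, pvSeg, h0b]
      rw [List.map_map]
      simp only [Function.comp_def, Nat.succ_eq_add_one, hst]
      rw [ih (toks.drop 1)]
      have h0t : PySem.List.pyGetD toks ((0 : Nat) : Int) "" = PySem.List.pyGetD toks 0 "" := by norm_num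
      simp [pvSeg, hc, h0t]
    · simp only [hc, decide_false, Bool.false_eq_true, if_false, pvSeg]
      rw [List.map_map]
      simp only [Function.comp_def, Nat.succ_eq_add_one, hst]
      rw [ih (toks.drop 1)]
      simp [pvSeg, hc]

theorem pvMapFilter (bbox : List (List Int)) (toks : List String) :
    ((PySem.List.pyRange 0 (bbox.length : Int)).filter
        (fun ii => decide (200 < PySem.List.pyGetD (PySem.List.pyGetD bbox ii []) 0 0))).map
      (fun ii => PySem.List.pyGetD toks ii "")
    = pvSeg bbox toks := by
  rw [PySem.List.pyRange_zero_natCast, List.filter_map, List.map_map]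
  simpa [Function.comp_def] using pvMapFilterNat bbox toks

theorem pvRowA (bbox : List (List Int)) (toks : List String) (acc : List String) :
    (PySem.List.pyRange 0 (bbox.length : Int)).foldl (fun acc2 ii =>
      if 200 < PySem.List.pyGetD (PySem.List.pyGetD bbox ii []) 0 0 then
        acc2 ++ [PySem.List.pyGetD toks ii ""]
      else acc2) acc = acc ++ pvSeg bbox toks := by
  have hbody : (fun (acc2 : List String) (ii : Int) =>
      if 200 < PySem.List.pyGetD (PySem.List.pyGetD bbox ii []) 0 0 then
        acc2 ++ [PySem.List.pyGetD toks ii ""]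
      else acc2)
    = (fun (acc2 : List String) (ii : Int) =>
      if (fun ii => decide (200 < PySem.List.pyGetD (PySem.List.pyGetD bbox ii []) 0 0)) ii = true then
        acc2 ++ [(fun ii => PySem.List.pyGetD toks ii "") ii]
      else acc2) := by
    funext acc2 ii
    by_cases h : 200 < PySem.List.pyGetD (PySem.List.pyGetD bbox ii []) 0 0 <;> simp [h]
  rw [hbody, PySem.List.foldl_append_if, pvMapFilter]

theorem pvOuterA (chunk : List (List (List String) × List (List Int))) :
    ∀ acc : List String,
    chunk.foldl (fun acc row =>
      (PySem.List.pyRange 0 (row.2.length : Int)).foldl (fun acc2 ii =>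
        if 200 < PySem.List.pyGetD (PySem.List.pyGetD row.2 ii []) 0 0 then
          acc2 ++ [PySem.List.pyGetD (PySem.List.pyGetD row.1 0 []) ii ""]
        else acc2) acc) acc
    = acc ++ pvSegsOf chunk := by
  induction chunk with
  | nil => intro acc; simp [pvSegsOf]
  | cons row rest ih =>
    intro acc
    simp only [List.foldl_cons]
    rw [pvRowA, ih]
    simp [pvSegsOf, pvSegRow, List.flatMap_cons]

theorem pvOuterB (chunk : List (List (List String) × List (List Int))) :
    ∀ d t : Int,
    chunk.foldl (fun acc row =>
      (List.zip row.2 (PySem.List.pyGetD row.1 0 [])).foldl (fun (acc2 : Int × Int) p =>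
        if 200 < PySem.List.pyGetD p.1 0 0 then
          p.2.toList.foldl (fun (acc3 : Int × Int) ch =>
            if ch ≠ ' ' then
              (acc3.1 + (if PySem.Chars.isdigit ch then 1 else 0), acc3.2 + 1)
            else acc3) acc2
        else acc2) acc) (d, t)
    = (d + (((pvSegsOf chunk).map pvCD).sum : Int), t + (((pvSegsOf chunk).map pvCN).sum : Int)) := by
  induction chunk with
  | nil => intro d t; simp [pvSegsOf]
  | cons row rest ih =>
    intro d t
    simp only [List.foldl_cons]
    rw [pvZipFold, ih]
    simp only [pvSegsOf, List.flatMap_cons, List.map_append, List.sum_append, pvSegRow, Prod.mk.injEq]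
    constructor <;> push_cast <;> ring


theorem pvJoinedD (chunk : List (List (List String) × List (List Int))) :
    ((List.intersperse " " (pvSegsOf chunk)).flatMap String.toList).countP pvPd = pvD chunk := by
  rw [pvJoinCount pvPd (by decide)]; rfl

theorem pvJoinedN (chunk : List (List (List String) × List (List Int))) :
    ((List.intersperse " " (pvSegsOf chunk)).flatMap String.toList).countP pvPn = pvN chunk := by
  rw [pvJoinCount pvPn (by decide)]; rfl

theorem pvAltEq (chunk : List (List (List String) × List (List Int))) :
    EBE_get_table_chunk_type_v_1_0_0_alt chunk
      = (if (((pvN chunk : Int) ≠ 0 ∧ 20 < PySem.Int.floordiv ((pvD chunk : Int) * 100) (pvN chunk : Int))) then "Numbers"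
         else if pvMax chunk > 5 then "Numbers" else "Text") := by
  simp only [EBE_get_table_chunk_type_v_1_0_0_alt]
  rw [pvOuterB]
  simp only [zero_add]
  rfl

theorem pvAEq (chunk : List (List (List String) × List (List Int))) :
    EBE_get_table_chunk_type_v_1_0_0 chunk
      = (if (((pvN chunk : Int) ≠ 0 ∧ 20 < PySem.Int.floordiv ((pvD chunk : Int) * 100) (pvN chunk : Int))) then "Numbers"
         else if pvMax chunk > 5 then "Numbers" else "Text") := by
  simp only [EBE_get_table_chunk_type_v_1_0_0, pvPercs]
  rw [pvOuterA, List.nil_append, pvTripleFold]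
  simp only [zero_add]
  have htot : ((((List.intersperse " " (pvSegsOf chunk)).flatMap String.toList).countP pvPd : Int)
        + (((List.intersperse " " (pvSegsOf chunk)).flatMap String.toList).countP pvPa : Int)
        + (((List.intersperse " " (pvSegsOf chunk)).flatMap String.toList).countP pvPo : Int))
      = ((pvN chunk : Int)) := by
    rw [← pvJoinedN chunk]
    push_cast [← pvSumThree]
    ring
  rw [htot, pvJoinedD]
  have hmax : List.foldl (fun acc row =>
      acc ++ [((PySem.List.pyGetD row.1 0 []).length : Int)]) [] chunk
      = chunk.map (fun row => ((PySem.List.pyGetD row.1 0 []).length : Int)) := by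
    rw [PySem.List.foldl_append_eq_flatMap, List.nil_append, ← List.map_eq_flatMap]
  rw [hmax]
  by_cases hN : pvN chunk = 0
  · have hNi : ((pvN chunk : Int)) = 0 := by exact_mod_cast hN
    simp [hN, hNi, pvMax]
  · have hNi : ¬((pvN chunk : Int)) = 0 := by exact_mod_cast hN
    by_cases hgt : 20 < PySem.Int.floordiv ((pvD chunk : Int) * 100) (pvN chunk : Int)
    · simp [hN, hNi, hgt]
    · simp [hN, hNi, hgt, pvMax]

-- ===== VERDICT (by name: the statement is the Claim_ definition above) =====
theorem EBE_get_table_chunk_type_v_1_0_0_spec : Claim_equal_EBE_get_table_chunk_type_v_1_0_0 := by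
  intro chunk _ _
  unfold Spec_EBE_get_table_chunk_type_v_1_0_0
  rw [pvAEq, pvAltEq]
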